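-- pv_equiv track=rewrite | github.com/Fogelman/search_engine | se/query.py | parse_raw_query_token
-- ===== SOURCE A (Python) =====
-- def parse_raw_query_token(q, cr_token, final_token):
--
--     result = f'["term", "{q[cr_token+1]}"]'
--     cr_token += 1
--     while cr_token != final_token:
--
--         if q[cr_token]  == "or":
--             result_or = f'["term", "{q[cr_token-1]}"]'
--             res, cr_token = parse_raw_query_token(q, cr_token, final_token)
--             result = f'["or", {result_or}, {res}]'
--         elif q[cr_token]  == "and":
--             result_and =  f'["term", "{q[cr_token-1]}"]'
--             res, cr_token = parse_raw_query_token(q, cr_token, final_token)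
--             result = f'["and", {result_and}, {res}]'
--         else:
--             cr_token +=1
--
--     return result,cr_token
-- ===== SOURCE B (Python) =====
-- def parse_raw_query_token(q, cr_token, final_token):
--     # Iterative: one live scan collecting operator positions, then build the
--     # nested string back-to-front with a right fold.
--     base = q[cr_token + 1]
--     cr = cr_token + 1
--     ops = []
--     while cr != final_token:
--         if q[cr] == "or" or q[cr] == "and":
--             ops.append(cr)
--         cr += 1
--     if not ops:
--         return f'["term", "{base}"]', cr
--     result = f'["term", "{q[ops[-1] + 1]}"]'
--     for i in reversed(ops):
--         result = f'["{q[i]}", ["term", "{q[i-1]}"], {result}]'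
--     return result, cr
-- ===== Notes on version B (the rewrite author's own statement) =====
-- stated objective: alternative
-- what changed: A parses by recursion nested inside a while loop, overwriting partial results; B does one iterative live-indexing scan that collects operator positions and then builds the nested string back-to-front with a single right fold.
import Mathlib
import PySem

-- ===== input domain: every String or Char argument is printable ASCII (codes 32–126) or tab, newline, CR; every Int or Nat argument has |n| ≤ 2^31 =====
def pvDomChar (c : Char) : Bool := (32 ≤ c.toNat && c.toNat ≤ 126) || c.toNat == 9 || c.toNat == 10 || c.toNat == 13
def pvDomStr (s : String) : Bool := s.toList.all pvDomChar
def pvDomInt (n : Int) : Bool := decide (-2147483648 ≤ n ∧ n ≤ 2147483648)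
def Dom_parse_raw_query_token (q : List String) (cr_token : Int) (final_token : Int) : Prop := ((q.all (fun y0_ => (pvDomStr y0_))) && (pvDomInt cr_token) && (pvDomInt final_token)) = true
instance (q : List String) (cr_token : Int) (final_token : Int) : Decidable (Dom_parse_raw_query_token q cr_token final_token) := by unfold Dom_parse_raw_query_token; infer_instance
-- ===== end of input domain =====

-- B replaces A's recursion-inside-a-while by one scan collecting operator positions plus a
-- right fold building the nested string back-to-front; same return value on all of Pre_.

-- ===== PORT A =====
-- A's while loop with its inlined recursive call, driven by fuel; fuel (final-cr) is always
-- sufficient where the Python terminates (inside Pre_); out-of-range indexing yields a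
-- default "" only outside Pre_ (where Python raises IndexError).
def pvALoop (q : List String) (final_token : Int) : Nat → Int → String → String × Int
  | 0, cr, result => (result, cr)
  | fuel+1, cr, result =>
    if cr = final_token then (result, cr)
    else if (PySem.List.pyGet? q cr).getD "" = "or" then
      let result_or := "[\"term\", \"" ++ (PySem.List.pyGet? q (cr-1)).getD "" ++ "\"]"
      let rc := pvALoop q final_token fuel (cr+1)
                  ("[\"term\", \"" ++ (PySem.List.pyGet? q (cr+1)).getD "" ++ "\"]")
      pvALoop q final_token fuel rc.2 ("[\"or\", " ++ result_or ++ ", " ++ rc.1 ++ "]")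
    else if (PySem.List.pyGet? q cr).getD "" = "and" then
      let result_and := "[\"term\", \"" ++ (PySem.List.pyGet? q (cr-1)).getD "" ++ "\"]"
      let rc := pvALoop q final_token fuel (cr+1)
                  ("[\"term\", \"" ++ (PySem.List.pyGet? q (cr+1)).getD "" ++ "\"]")
      pvALoop q final_token fuel rc.2 ("[\"and\", " ++ result_and ++ ", " ++ rc.1 ++ "]")
    else pvALoop q final_token fuel (cr+1) result

def parse_raw_query_token (q : List String) (cr_token : Int) (final_token : Int) : String × Int :=
  pvALoop q final_token (final_token - cr_token).toNat (cr_token + 1)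
    ("[\"term\", \"" ++ (PySem.List.pyGet? q (cr_token + 1)).getD "" ++ "\"]")

-- ===== PORT B =====
-- the collecting while loop of Source B (live indexing, fueled like A's loop)
def pvBScan (q : List String) (final_token : Int) : Nat → Int → List Int → List Int × Int
  | 0, cr, ops => (ops, cr)
  | fuel+1, cr, ops =>
    if cr = final_token then (ops, cr)
    else if (PySem.List.pyGet? q cr).getD "" = "or" ∨ (PySem.List.pyGet? q cr).getD "" = "and" then
      pvBScan q final_token fuel (cr + 1) (ops ++ [cr])
    else pvBScan q final_token fuel (cr + 1) ops

-- one step of Source B's 'for i in reversed(ops)' body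
def pvBWrap (q : List String) (i : Int) (res : String) : String :=
  "[\"" ++ (PySem.List.pyGet? q i).getD "" ++ "\", [\"term\", \"" ++
    (PySem.List.pyGet? q (i-1)).getD "" ++ "\"], " ++ res ++ "]"

def parse_raw_query_token_alt (q : List String) (cr_token : Int) (final_token : Int) : String × Int :=
  let base := (PySem.List.pyGet? q (cr_token + 1)).getD ""
  let sc := pvBScan q final_token (final_token - cr_token).toNat (cr_token + 1) []
  match sc.1.getLast? with
  | none => ("[\"term\", \"" ++ base ++ "\"]", sc.2)
  | some last =>
      (sc.1.foldr (pvBWrap q)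
         ("[\"term\", \"" ++ (PySem.List.pyGet? q (last + 1)).getD "" ++ "\"]"), sc.2)

-- ===== PRECONDITION & SPEC =====
-- Pre_ is exactly where the Python A returns: the base index cr_token+1 is in (negative-wrap)
-- range, final_token is reachable going right and within the list, and neither of the two
-- IndexError corners fires (an operator at position len-1 with final_token = len makes A index
-- q[len]; an operator at the very first scanned slot when cr_token+1 = -len makes A index q[-len-1]).
def Pre_parse_raw_query_token (q : List String) (cr_token : Int) (final_token : Int) : Prop :=
  0 < q.length ∧ -(q.length : Int) ≤ cr_token + 1 ∧ cr_token + 1 < (q.length : Int) ∧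
  cr_token + 1 ≤ final_token ∧ final_token ≤ (q.length : Int) ∧
  ¬(final_token = (q.length : Int) ∧
      ((PySem.List.pyGet? q ((q.length : Int) - 1)).getD "" = "or" ∨
       (PySem.List.pyGet? q ((q.length : Int) - 1)).getD "" = "and")) ∧
  ¬(cr_token + 1 = -(q.length : Int) ∧ cr_token + 1 < final_token ∧
      ((PySem.List.pyGet? q 0).getD "" = "or" ∨ (PySem.List.pyGet? q 0).getD "" = "and"))
instance (q : List String) (cr_token : Int) (final_token : Int) : Decidable (Pre_parse_raw_query_token q cr_token final_token) := by unfold Pre_parse_raw_query_token; infer_instance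

def pvWitness_parse_raw_query_token : List String × Int × Int := (["a", "or", "b"], -1, 3)

def Spec_parse_raw_query_token (q : List String) (cr_token : Int) (final_token : Int) (out : String × Int) : Prop := out = parse_raw_query_token_alt q cr_token final_token
instance (q : List String) (cr_token : Int) (final_token : Int) (out : String × Int) : Decidable (Spec_parse_raw_query_token q cr_token final_token out) := by unfold Spec_parse_raw_query_token; infer_instance

-- ===== CLAIM (what is proved, stated in full; the proofs are below) =====
def Claim_equal_parse_raw_query_token : Prop := ∀ (q : List String) (cr_token : Int) (final_token : Int), Dom_parse_raw_query_token q cr_token final_token → Pre_parse_raw_query_token q cr_token final_token → Spec_parse_raw_query_token q cr_token final_token (parse_raw_query_token q cr_token final_token)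

-- ===== LEMMAS AND PROOFS =====

-- the operator positions in [cr, cr+k), in scan order
def pvOps (q : List String) : Nat → Int → List Int
  | 0, _ => []
  | k+1, cr =>
    if (PySem.List.pyGet? q cr).getD "" = "or" ∨ (PySem.List.pyGet? q cr).getD "" = "and"
    then cr :: pvOps q k (cr+1) else pvOps q k (cr+1)

-- the nested string a nonempty operator list produces
def pvNest (q : List String) : Int → List Int → String
  | i, [] => pvBWrap q i ("[\"term\", \"" ++ (PySem.List.pyGet? q (i+1)).getD "" ++ "\"]")
  | i, j :: rest => pvBWrap q i (pvNest q j rest)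

-- what A's loop returns as first component, given the remaining window k and start result r
def pvAns (q : List String) (k : Nat) (cr : Int) (r : String) : String :=
  match pvOps q k cr with
  | [] => r
  | i :: rest => pvNest q i rest

theorem pvBWrap_or (q : List String) (cr : Int) (res : String)
    (h : (PySem.List.pyGet? q cr).getD "" = "or") :
    "[\"or\", " ++ ("[\"term\", \"" ++ (PySem.List.pyGet? q (cr-1)).getD "" ++ "\"]") ++ ", " ++ res ++ "]"
      = pvBWrap q cr res := by
  unfold pvBWrap; rw [h]; apply String.ext; simp

theorem pvBWrap_and (q : List String) (cr : Int) (res : String)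
    (h : (PySem.List.pyGet? q cr).getD "" = "and") :
    "[\"and\", " ++ ("[\"term\", \"" ++ (PySem.List.pyGet? q (cr-1)).getD "" ++ "\"]") ++ ", " ++ res ++ "]"
      = pvBWrap q cr res := by
  unfold pvBWrap; rw [h]; apply String.ext; simp

theorem pvOps_succ (q : List String) (k : Nat) (cr : Int) :
    pvOps q (k+1) cr =
      if (PySem.List.pyGet? q cr).getD "" = "or" ∨ (PySem.List.pyGet? q cr).getD "" = "and"
      then cr :: pvOps q k (cr+1) else pvOps q k (cr+1) := rfl

theorem pvAns_op (q : List String) (k : Nat) (cr : Int) (r : String)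
    (h : (PySem.List.pyGet? q cr).getD "" = "or" ∨ (PySem.List.pyGet? q cr).getD "" = "and") :
    pvAns q (k+1) cr r
      = pvBWrap q cr (pvAns q k (cr+1) ("[\"term\", \"" ++ (PySem.List.pyGet? q (cr+1)).getD "" ++ "\"]")) := by
  unfold pvAns
  rw [pvOps_succ, if_pos h]
  cases pvOps q k (cr+1) <;> simp [pvNest]

theorem pvAns_notop (q : List String) (k : Nat) (cr : Int) (r : String)
    (h : ¬((PySem.List.pyGet? q cr).getD "" = "or" ∨ (PySem.List.pyGet? q cr).getD "" = "and")) :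
    pvAns q (k+1) cr r = pvAns q k (cr+1) r := by
  unfold pvAns
  rw [pvOps_succ, if_neg h]

theorem pvALoop_eq (q : List String) (f : Int) :
    ∀ (fuel : Nat) (cr : Int) (r : String), cr ≤ f → (f - cr).toNat ≤ fuel →
      pvALoop q f fuel cr r = (pvAns q ((f - cr).toNat) cr r, f) := by
  intro fuel
  induction fuel with
  | zero =>
    intro cr r hle hf
    have : cr = f := by omega
    subst this
    simp [pvALoop, pvAns, pvOps]
  | succ fuel ih =>
    intro cr r hle hf
    by_cases hcr : cr = f
    · subst hcr
      simp [pvALoop, pvAns, pvOps]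
    · have hlt : cr < f := lt_of_le_of_ne hle hcr
      have hk : (f - cr).toNat = (f - (cr+1)).toNat + 1 := by omega
      have hle1 : cr + 1 ≤ f := by omega
      have hf1 : (f - (cr+1)).toNat ≤ fuel := by omega
      have hf0 : (f - f).toNat ≤ fuel := by omega
      by_cases hor : (PySem.List.pyGet? q cr).getD "" = "or"
      · rw [pvALoop, if_neg hcr, if_pos hor]
        rw [ih (cr+1) _ hle1 hf1, ih f _ le_rfl hf0]
        rw [hk, pvAns_op q _ cr r (Or.inl hor)]
        rw [pvBWrap_or q cr _ hor]
        simp [pvAns, pvOps]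
      · by_cases hand : (PySem.List.pyGet? q cr).getD "" = "and"
        · rw [pvALoop, if_neg hcr, if_neg hor, if_pos hand]
          rw [ih (cr+1) _ hle1 hf1, ih f _ le_rfl hf0]
          rw [hk, pvAns_op q _ cr r (Or.inr hand)]
          rw [pvBWrap_and q cr _ hand]
          simp [pvAns, pvOps]
        · rw [pvALoop, if_neg hcr, if_neg hor, if_neg hand]
          rw [ih (cr+1) r hle1 hf1]
          rw [hk, pvAns_notop q _ cr r (by tauto)]

theorem pvBScan_eq (q : List String) (f : Int) :
    ∀ (fuel : Nat) (cr : Int) (acc : List Int), cr ≤ f → (f - cr).toNat ≤ fuel →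
      pvBScan q f fuel cr acc = (acc ++ pvOps q ((f - cr).toNat) cr, f) := by
  intro fuel
  induction fuel with
  | zero =>
    intro cr acc hle hf
    have : cr = f := by omega
    subst this
    simp [pvBScan, pvOps]
  | succ fuel ih =>
    intro cr acc hle hf
    by_cases hcr : cr = f
    · subst hcr
      simp [pvBScan, pvOps]
    · have hlt : cr < f := lt_of_le_of_ne hle hcr
      have hk : (f - cr).toNat = (f - (cr+1)).toNat + 1 := by omega
      have hle1 : cr + 1 ≤ f := by omega
      have hf1 : (f - (cr+1)).toNat ≤ fuel := by omega
      by_cases hop : (PySem.List.pyGet? q cr).getD "" = "or" ∨ (PySem.List.pyGet? q cr).getD "" = "and"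
      · rw [pvBScan, if_neg hcr, if_pos hop, ih (cr+1) _ hle1 hf1, hk, pvOps_succ, if_pos hop]
        simp
      · rw [pvBScan, if_neg hcr, if_neg hop, ih (cr+1) _ hle1 hf1, hk, pvOps_succ, if_neg hop]

theorem pvFoldr_nest (q : List String) :
    ∀ (rest : List Int) (i last : Int), (i :: rest).getLast? = some last →
      (i :: rest).foldr (pvBWrap q)
          ("[\"term\", \"" ++ (PySem.List.pyGet? q (last + 1)).getD "" ++ "\"]")
        = pvNest q i rest := by
  intro rest
  induction rest with
  | nil =>
    intro i last h
    simp at h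
    subst h
    simp [pvNest]
  | cons j rs ih =>
    intro i last h
    have h' : (j :: rs).getLast? = some last := by
      simpa [List.getLast?_cons_cons] using h
    simp only [List.foldr_cons]
    have := ih j last h'
    simp only [List.foldr_cons] at this
    rw [this]
    simp [pvNest]

-- ===== VERDICT (by name: the statement is the Claim_ definition above) =====
theorem parse_raw_query_token_spec : Claim_equal_parse_raw_query_token := by
  intro q cr_token final_token _hdom hpre
  obtain ⟨-, -, -, hsf, -, -, -⟩ := hpre
  unfold Spec_parse_raw_query_token parse_raw_query_token parse_raw_query_token_alt
  have hfuel : (final_token - (cr_token + 1)).toNat ≤ (final_token - cr_token).toNat := by omega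
  rw [pvALoop_eq q final_token _ (cr_token + 1) _ hsf hfuel]
  rw [pvBScan_eq q final_token _ (cr_token + 1) [] hsf hfuel]
  simp only [List.nil_append]
  unfold pvAns
  cases hops : pvOps q ((final_token - (cr_token + 1)).toNat) (cr_token + 1) with
  | nil => simp
  | cons i rest =>
    simp only
    have hne : (i :: rest) ≠ ([] : List Int) := by simp
    obtain ⟨last, hlast⟩ : ∃ last, (i :: rest).getLast? = some last := by
      cases h : (i :: rest).getLast? with
      | none => simp [List.getLast?_eq_none_iff] at h
      | some l => exact ⟨l, rfl⟩
    rw [hlast]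
    simp only
    rw [pvFoldr_nest q rest i last hlast]
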